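-- pv_equiv track=rewrite | github.com/Emerald141/project-euler | Problems 601-700/p657_IncompleteWords.py | solve
-- ===== SOURCE A (Python) =====
-- mod = 1000000007
--
-- def inv(x):
--     # returns the modular inverse of x, for division purposes
--     return pow(x, mod - 2, mod)
--
-- def A(m,n):
--     if m == 1:
--         return n + 1
--     return ((pow(m, n+1, mod) - 1) * inv(m-1)) % mod
--
-- def solve(m = 10 ** 7, n = 10 ** 12):
--     result = 0
--     sign = 1
--     coeff = 1
--     for x in range(m-1, -1, -1):
--         coeff = coeff * (x + 1) * inv(m - x) % mod
--         result += sign * coeff * A(x, n)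
--         result %= mod
--         sign *= -1
--     return result
-- ===== SOURCE B (Python) =====
-- mod = 1000000007
--
-- def inv(x):
--     # returns the modular inverse of x, for division purposes
--     return pow(x, mod - 2, mod)
--
-- def A(m, n):
--     if m == 1:
--         return n + 1
--     return ((pow(m, n+1, mod) - 1) * inv(m-1)) % mod
--
-- def solve(m = 10 ** 7, n = 10 ** 12):
--     # two prefix-product tables, then one ascending accumulation pass:
--     # P[k] = m*(m-1)*...*(m-k+1) mod p,  Q[k] = inv(1)*inv(2)*...*inv(k) mod p,
--     # so P[k]*Q[k] is the binomial coefficient C(m, k) mod p.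
--     P = [1]
--     p_run = 1
--     for k in range(1, m + 1):
--         p_run = p_run * (m - k + 1) % mod
--         P.append(p_run)
--     Q = [1]
--     q_run = 1
--     for k in range(1, m + 1):
--         q_run = q_run * inv(k) % mod
--         Q.append(q_run)
--     result = 0
--     for x in range(m):
--         k = m - x
--         coeff = P[k] * Q[k] % mod
--         sign = 1 if (m - 1 - x) % 2 == 0 else -1
--         result = (result + sign * coeff * A(x, n)) % mod
--     return result
-- ===== Notes on version B (the rewrite author's own statement) =====
-- stated objective: alternative
-- what changed: The single loop threading (result, sign, coeff) with a per-step running product is replaced by two separate prefix-product table passes (falling-factorial table P and inverse table Q, so P[k]*Q[k] = C(m,k) mod p) followed by an ascending accumulation pass that looks the coefficient up and computes the sign from the index parity instead of threading it.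
import Mathlib
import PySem

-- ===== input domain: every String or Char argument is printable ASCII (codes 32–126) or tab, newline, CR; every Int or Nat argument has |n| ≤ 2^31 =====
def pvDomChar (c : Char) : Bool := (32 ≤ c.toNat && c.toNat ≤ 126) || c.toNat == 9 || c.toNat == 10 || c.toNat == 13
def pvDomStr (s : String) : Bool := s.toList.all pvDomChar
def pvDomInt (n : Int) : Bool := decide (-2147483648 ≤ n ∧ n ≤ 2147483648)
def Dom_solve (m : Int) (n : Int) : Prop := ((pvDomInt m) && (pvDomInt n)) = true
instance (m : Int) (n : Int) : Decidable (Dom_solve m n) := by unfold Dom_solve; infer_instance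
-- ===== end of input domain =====

-- B replaces A's single loop threading (result, sign, coeff) by two prefix-product table
-- passes plus an ascending accumulation pass with table lookups and parity-computed signs
-- (objective: alternative decomposition, same cost).

-- ===== PORT A =====
def pvMod : Int := 1000000007

-- pow(b, e, m) for e ≥ 0, m > 0, by binary exponentiation (same value as
-- PySem.Int.powMod b e m, which is written b^e % m and cannot be evaluated at
-- the exponents this program uses); reducing with PySem.Int.mod at every step
-- keeps the result in [0, m) exactly as Python's pow does
def pvPowMod (b : Int) (e : Nat) (m : Int) : Int :=
  if h : e = 0 then PySem.Int.mod 1 m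
  else
    let r := pvPowMod b (e / 2) m
    let r2 := PySem.Int.mod (r * r) m
    if e % 2 = 1 then PySem.Int.mod (r2 * b) m else r2
termination_by e
decreasing_by exact Nat.div_lt_self (Nat.pos_of_ne_zero h) (by norm_num)

-- inv(x) = pow(x, mod - 2, mod)
def pvInv (x : Int) : Int := pvPowMod x 1000000005 pvMod

-- A(m, n); the exponent n+1 is ≥ 0 on every run admitted by Pre_solve (Python's pow
-- raises on the excluded runs when it reaches base 0 with a negative exponent)
def pvA (mm : Int) (n : Int) : Int :=
  if mm = 1 then n + 1
  else PySem.Int.mod ((pvPowMod mm (n + 1).toNat pvMod - 1) * pvInv (mm - 1)) pvMod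

-- the body of A's for-loop over state (result, sign, coeff)
def solveStep (m : Int) (n : Int) (s : Int × Int × Int) (x : Int) : Int × Int × Int :=
  let coeff := PySem.Int.mod (s.2.2 * (x + 1) * pvInv (m - x)) pvMod
  let result := PySem.Int.mod (s.1 + s.2.1 * coeff * pvA x n) pvMod
  (result, s.2.1 * (-1), coeff)

def solve (m : Int) (n : Int) : Int :=
  ((PySem.List.pyRange (m - 1) (-1) (-1)).foldl (solveStep m n) (0, 1, 1)).1

-- ===== PORT B =====
-- first pass: P[k] = m*(m-1)*...*(m-k+1) mod p
def altTableP (m : Int) : List Int × Int :=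
  (PySem.List.pyRange 1 (m + 1) 1).foldl
    (fun (s : List Int × Int) k =>
      let pr := PySem.Int.mod (s.2 * (m - k + 1)) pvMod
      (s.1 ++ [pr], pr)) ([1], 1)

-- second pass: Q[k] = inv(1)*inv(2)*...*inv(k) mod p
def altTableQ (m : Int) : List Int × Int :=
  (PySem.List.pyRange 1 (m + 1) 1).foldl
    (fun (s : List Int × Int) k =>
      let qr := PySem.Int.mod (s.2 * pvInv k) pvMod
      (s.1 ++ [qr], qr)) ([1], 1)

-- body of the accumulation pass: sign from the parity of m-1-x, coefficient by table lookup
def altStep (m : Int) (n : Int) (P : List Int) (Q : List Int) (result : Int) (x : Int) : Int :=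
  let k := m - x
  let coeff := PySem.Int.mod (PySem.List.pyGetD P k 0 * PySem.List.pyGetD Q k 0) pvMod
  let sign : Int := if PySem.Int.mod (m - 1 - x) 2 = 0 then 1 else -1
  PySem.Int.mod (result + sign * coeff * pvA x n) pvMod

def solve_alt (m : Int) (n : Int) : Int :=
  (PySem.List.pyRange 0 m 1).foldl (altStep m n (altTableP m).1 (altTableQ m).1) 0

-- ===== PRECONDITION & SPEC =====
-- For m ≥ 1 and n ≤ -2 the loop reaches x = 0 and pow(0, n+1, mod) raises ValueError
-- (negative exponent, non-invertible base); those inputs are excluded.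
def Pre_solve (m : Int) (n : Int) : Prop := m ≤ 0 ∨ -1 ≤ n
instance (m : Int) (n : Int) : Decidable (Pre_solve m n) := by unfold Pre_solve; infer_instance
def pvWitness_solve : Int × Int := (3, 5)

def Spec_solve (m : Int) (n : Int) (out : Int) : Prop := out = solve_alt m n
instance (m : Int) (n : Int) (out : Int) : Decidable (Spec_solve m n out) := by unfold Spec_solve; infer_instance

-- ===== CLAIM (what is proved, stated in full; the proofs are below) =====
def Claim_equal_solve : Prop := ∀ (m : Int) (n : Int), Dom_solve m n → Pre_solve m n → Spec_solve m n (solve m n)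

-- ===== LEMMAS AND PROOFS =====

-- proof-level sequences (plain Int.emod, since the modulus is positive)
def coefA (m : Int) : Nat → Int
  | 0 => 1
  | k + 1 => (coefA m k * (m - k) * pvInv (k + 1)) % pvMod

def seqP (m : Int) : Nat → Int
  | 0 => 1
  | k + 1 => (seqP m k * (m - k)) % pvMod

def seqQ : Nat → Int
  | 0 => 1
  | k + 1 => (seqQ k * pvInv (k + 1)) % pvMod

-- the j-th term of the alternating sum (j-th loop step of A, x = m-1-j)
def termF (m : Int) (n : Int) (j : Nat) : Int :=
  (-1 : Int) ^ j * coefA m (j + 1) * pvA (m - 1 - j) n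

theorem modP_eq (a : Int) : PySem.Int.mod a pvMod = a % pvMod :=
  PySem.Int.mod_eq_emod_of_pos (by norm_num [pvMod])

theorem mod2_eq (a : Int) : PySem.Int.mod a 2 = a % 2 :=
  PySem.Int.mod_eq_emod_of_pos (by norm_num)

theorem mulmod_l (a b : Int) : (a % pvMod * b) % pvMod = (a * b) % pvMod := by
  rw [Int.mul_emod, Int.emod_emod_of_dvd _ dvd_rfl, ← Int.mul_emod]

theorem mulmod_r (a b : Int) : (a * (b % pvMod)) % pvMod = (a * b) % pvMod := by
  rw [Int.mul_emod, Int.emod_emod_of_dvd _ dvd_rfl, ← Int.mul_emod]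

theorem addmod_l (a b : Int) : (a % pvMod + b) % pvMod = (a + b) % pvMod := by
  rw [Int.add_emod, Int.emod_emod_of_dvd _ dvd_rfl, ← Int.add_emod]

theorem foldA (m n : Int) : ∀ (N t : Nat) (r : Int), r % pvMod = r →
    ((List.range N).map (fun (j : Nat) => (m - 1 - (t : Int)) - (j : Int))).foldl (solveStep m n)
      (r, (-1) ^ t, coefA m t)
    = ((r + ((List.range N).map (fun j => termF m n (t + j))).sum) % pvMod,
       (-1) ^ (t + N), coefA m (t + N)) := by
  intro N
  induction N with
  | zero => intro t r hr; simp [hr]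
  | succ N ih =>
    intro t r hr
    rw [List.range_succ_eq_map, List.map_cons, List.foldl_cons, List.map_map,
        List.map_cons, List.sum_cons, List.map_map]
    have ec : PySem.Int.mod (coefA m t * ((m - 1 - (t:Int) - ((0:Nat):Int)) + 1) *
        pvInv (m - (m - 1 - (t:Int) - ((0:Nat):Int)))) pvMod = coefA m (t+1) := by
      rw [modP_eq]
      conv_rhs => rw [coefA]
      rw [show m - (m - 1 - (t:Int) - ((0:Nat):Int)) = (t:Int) + 1 by push_cast; ring]
      congr 1
      push_cast; ring
    have hstep : solveStep m n (r, (-1) ^ t, coefA m t) (m - 1 - (t:Int) - ((0:Nat):Int))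
        = ((r + (-1:Int) ^ t * coefA m (t+1) * pvA (m - 1 - (t:Int) - ((0:Nat):Int)) n) % pvMod,
           (-1) ^ (t+1), coefA m (t+1)) := by
      show (PySem.Int.mod (r + (-1:Int) ^ t * (PySem.Int.mod (coefA m t *
            ((m - 1 - (t:Int) - ((0:Nat):Int)) + 1) *
            pvInv (m - (m - 1 - (t:Int) - ((0:Nat):Int)))) pvMod) *
            pvA (m - 1 - (t:Int) - ((0:Nat):Int)) n) pvMod,
          (-1:Int) ^ t * (-1), PySem.Int.mod (coefA m t *
            ((m - 1 - (t:Int) - ((0:Nat):Int)) + 1) *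
            pvInv (m - (m - 1 - (t:Int) - ((0:Nat):Int)))) pvMod) = _
      rw [ec, modP_eq, ← pow_succ]
    rw [hstep]
    have hlist : (List.range N).map ((fun (j : Nat) => (m - 1 - (t:Int)) - (j:Int)) ∘ Nat.succ)
        = (List.range N).map (fun (j : Nat) => (m - 1 - ((t+1 : Nat):Int)) - (j:Int)) := by
      apply List.map_congr_left; intro j hj
      simp only [Function.comp_apply]; push_cast; ring
    rw [hlist, ih (t+1) _ (Int.emod_emod_of_dvd _ dvd_rfl)]
    have hterm : (r + (-1:Int) ^ t * coefA m (t+1) * pvA (m - 1 - (t:Int) - ((0:Nat):Int)) n)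
        = r + termF m n (t + 0) := by
      simp only [termF]; push_cast; ring_nf
    have hsum : (List.range N).map (fun j => termF m n ((t+1) + j))
        = (List.range N).map ((fun j => termF m n (t + j)) ∘ Nat.succ) := by
      apply List.map_congr_left; intro j hj
      simp only [Function.comp_apply]
      exact congrArg _ (by omega)
    rw [hterm, hsum, addmod_l]
    have hidx : t + 1 + N = t + (N + 1) := by omega
    rw [hidx, add_assoc]

theorem solve_eq_sum (m n : Int) :
    solve m n = (((List.range m.toNat).map (termF m n)).sum) % pvMod := by
  unfold solve
  rw [PySem.List.pyRange_neg_one, show m - 1 - (-1) = m by ring]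
  have hl : (List.range m.toNat).map (fun (k : Nat) => m - 1 - (k : Int))
      = (List.range m.toNat).map (fun (j : Nat) => (m - 1 - ((0:Nat) : Int)) - (j : Int)) := by
    apply List.map_congr_left; intro j hj; push_cast; ring
  rw [hl, show ((0:Int), (1:Int), (1:Int)) = ((0:Int), (-1:Int) ^ (0:Nat), coefA m 0) by
    norm_num [coefA]]
  rw [foldA m n m.toNat 0 0 (by norm_num)]
  have hsum0 : (List.range m.toNat).map (fun j => termF m n (0 + j))
      = (List.range m.toNat).map (termF m n) := by
    apply List.map_congr_left; intro j hj; rw [Nat.zero_add]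
  show (0 + ((List.range m.toNat).map (fun j => termF m n (0 + j))).sum) % pvMod = _
  rw [hsum0, zero_add]

theorem foldTab (f : Nat → Int) (g : Int → Int)
    (hstep : ∀ k : Nat, f (k + 1) = (f k * g ((k : Int) + 1)) % pvMod) :
    ∀ (N t : Nat) (L : List Int),
    ((List.range N).map (fun j => (1 : Int) + ((t + j : Nat) : Int))).foldl
      (fun (s : List Int × Int) k => (s.1 ++ [PySem.Int.mod (s.2 * g k) pvMod],
        PySem.Int.mod (s.2 * g k) pvMod)) (L, f t)
    = (L ++ (List.range N).map (fun j => f (t + j + 1)), f (t + N)) := by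
  intro N
  induction N with
  | zero => intro t L; simp
  | succ N ih =>
    intro t L
    rw [List.range_succ_eq_map, List.map_cons, List.foldl_cons, List.map_map]
    have hfst : PySem.Int.mod (f t * g (1 + ((t + 0 : Nat) : Int))) pvMod = f (t + 1) := by
      rw [modP_eq, hstep t]; norm_num [add_comm]
    simp only [hfst]
    have hlist : (List.range N).map ((fun j => (1:Int) + ((t + j : Nat) : Int)) ∘ Nat.succ)
        = (List.range N).map (fun j => (1:Int) + (((t+1) + j : Nat) : Int)) := by
      apply List.map_congr_left; intro j hj
      simp only [Function.comp_apply]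
      congr 1; push_cast; ring
    rw [hlist, ih (t+1) (L ++ [f (t+1)])]
    refine Prod.ext ?_ (congrArg f (by omega))
    show (L ++ [f (t+1)]) ++ _ = _
    rw [List.append_assoc]
    congr 1
    rw [List.map_cons, List.map_map, List.singleton_append]
    refine congrArg₂ _ (congrArg f (by omega)) ?_
    apply List.map_congr_left; intro j hj
    simp only [Function.comp_apply]
    exact congrArg f (by omega)

theorem tableP_eq (m : Int) : (altTableP m).1 = (List.range (m.toNat + 1)).map (seqP m) := by
  unfold altTableP
  rw [PySem.List.pyRange_one, show m + 1 - 1 = m by ring]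
  have hl : (List.range m.toNat).map (fun (k : Nat) => (1:Int) + (k : Int))
      = (List.range m.toNat).map (fun (j : Nat) => (1:Int) + ((0 + j : Nat) : Int)) := by
    apply List.map_congr_left; intro j hj; push_cast; ring
  rw [hl]
  have hstep : ∀ k : Nat, seqP m (k + 1) = (seqP m k * ((fun x => m - x + 1) ((k:Int) + 1))) % pvMod := by
    intro k; conv_lhs => rw [seqP]
    congr 1; push_cast; ring
  have hft := foldTab (seqP m) (fun x => m - x + 1) hstep m.toNat 0 [1]
  show (((List.range m.toNat).map (fun (j : Nat) => (1:Int) + ((0 + j : Nat) : Int))).foldl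
      (fun (s : List Int × Int) k => (s.1 ++ [PySem.Int.mod (s.2 * (m - k + 1)) pvMod],
        PySem.Int.mod (s.2 * (m - k + 1)) pvMod)) ([1], seqP m 0)).1 = _
  rw [hft]
  show [(1:Int)] ++ (List.range m.toNat).map (fun j => seqP m (0 + j + 1)) = _
  rw [List.singleton_append, List.range_succ_eq_map, List.map_cons, List.map_map]
  refine congrArg₂ _ rfl ?_
  apply List.map_congr_left; intro j hj
  simp only [Function.comp_apply]
  exact congrArg _ (by omega)

theorem tableQ_eq (m : Int) : (altTableQ m).1 = (List.range (m.toNat + 1)).map seqQ := by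
  unfold altTableQ
  rw [PySem.List.pyRange_one, show m + 1 - 1 = m by ring]
  have hl : (List.range m.toNat).map (fun (k : Nat) => (1:Int) + (k : Int))
      = (List.range m.toNat).map (fun (j : Nat) => (1:Int) + ((0 + j : Nat) : Int)) := by
    apply List.map_congr_left; intro j hj; push_cast; ring
  rw [hl]
  have hstep : ∀ k : Nat, seqQ (k + 1) = (seqQ k * ((fun x => pvInv x) ((k:Int) + 1))) % pvMod := by
    intro k; conv_lhs => rw [seqQ]
  have hft := foldTab seqQ (fun x => pvInv x) hstep m.toNat 0 [1]
  show (((List.range m.toNat).map (fun (j : Nat) => (1:Int) + ((0 + j : Nat) : Int))).foldl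
      (fun (s : List Int × Int) k => (s.1 ++ [PySem.Int.mod (s.2 * pvInv k) pvMod],
        PySem.Int.mod (s.2 * pvInv k) pvMod)) ([1], seqQ 0)).1 = _
  rw [hft]
  show [(1:Int)] ++ (List.range m.toNat).map (fun j => seqQ (0 + j + 1)) = _
  rw [List.singleton_append, List.range_succ_eq_map, List.map_cons, List.map_map]
  refine congrArg₂ _ rfl ?_
  apply List.map_congr_left; intro j hj
  simp only [Function.comp_apply]
  exact congrArg _ (by omega)

theorem getTab (f : Nat → Int) (M : Nat) (k : Int) (h1 : 0 ≤ k) (h2 : k < (M : Int) + 1) :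
    PySem.List.pyGetD ((List.range (M + 1)).map f) k 0 = f k.toNat := by
  rw [PySem.List.pyGetD_eq_getElem _ _ h1 (by simp; omega)]
  rw [List.getElem_map, List.getElem_range]

theorem coefA_eq (m : Int) : ∀ k : Nat, coefA m k = (seqP m k * seqQ k) % pvMod := by
  intro k
  induction k with
  | zero => show (1 : Int) = (1 * 1) % pvMod; norm_num [pvMod]
  | succ k ih =>
    show (coefA m k * (m - k) * pvInv (k + 1)) % pvMod
        = ((seqP m k * (m - k)) % pvMod * ((seqQ k * pvInv (k + 1)) % pvMod)) % pvMod
    rw [ih, mul_assoc, mulmod_l, mulmod_r, mulmod_l]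
    ring_nf

theorem sgn_pow (e : Nat) : (if ((e : Int) % 2 = 0) then (1 : Int) else -1) = (-1 : Int) ^ e := by
  rcases Nat.even_or_odd e with h | h
  · rw [h.neg_one_pow, if_pos (Int.even_iff.mp ((Int.even_coe_nat e).2 h))]
  · rw [h.neg_one_pow, if_neg (by have := Int.odd_iff.mp ((Int.odd_coe_nat e).2 h); omega)]

theorem foldMod {α : Type} (F : α → Int) (l : List α) : ∀ r : Int, r % pvMod = r →
    l.foldl (fun acc x => (acc + F x) % pvMod) r = (r + (l.map F).sum) % pvMod := by
  induction l with
  | nil => intro r h; simpa using h.symm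
  | cons a t ih =>
    intro r h
    simp only [List.foldl_cons, List.map_cons, List.sum_cons]
    rw [ih _ (Int.emod_emod_of_dvd _ dvd_rfl)]
    rw [Int.add_emod ((r + F a) % pvMod), Int.emod_emod_of_dvd _ dvd_rfl, ← Int.add_emod]
    ring_nf

theorem map_reflect {β : Type} (g : Nat → β) : ∀ N : Nat,
    (List.range N).map (fun j => g (N - 1 - j)) = ((List.range N).map g).reverse := by
  intro N
  induction N generalizing g with
  | zero => simp
  | succ n ih =>
    have h1 : (List.range (n+1)).map (fun j => g (n + 1 - 1 - j))
        = g n :: (List.range n).map (fun j => g (n - 1 - j)) := by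
      rw [List.range_succ_eq_map, List.map_cons, List.map_map]
      refine congrArg₂ _ (congrArg g (by omega)) ?_
      apply List.map_congr_left; intro j hj
      simp only [Function.comp_apply]
      exact congrArg g (by omega)
    rw [h1, List.range_succ, List.map_append, List.reverse_append, ih g]
    simp

def altTerm (m : Int) (n : Int) (x : Int) : Int :=
  (if ((m - 1 - x) % 2 = 0) then (1:Int) else -1) *
    ((PySem.List.pyGetD (altTableP m).1 (m - x) 0 *
      PySem.List.pyGetD (altTableQ m).1 (m - x) 0) % pvMod) * pvA x n

theorem solve_alt_eq_sum (m n : Int) :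
    solve_alt m n = (((List.range m.toNat).map (fun j => termF m n (m.toNat - 1 - j))).sum) % pvMod := by
  unfold solve_alt
  have hbody : altStep m n (altTableP m).1 (altTableQ m).1
      = fun acc x => (acc + altTerm m n x) % pvMod := by
    funext acc x
    simp only [altStep, altTerm, modP_eq, mod2_eq]
  rw [hbody, foldMod (altTerm m n) (PySem.List.pyRange 0 m 1) 0 (by norm_num), zero_add]
  rw [PySem.List.pyRange_one, show (m:Int) - 0 = m by ring, List.map_map]
  refine congrArg (· % pvMod) (congrArg List.sum ?_)
  apply List.map_congr_left
  intro j hj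
  have hjM : j < m.toNat := List.mem_range.mp hj
  have hm : m = (m.toNat : Int) := by omega
  simp only [Function.comp_apply]
  show altTerm m n (0 + (j:Int)) = _
  unfold altTerm
  rw [zero_add, tableP_eq, tableQ_eq]
  rw [getTab (seqP m) m.toNat (m - (j:Int)) (by omega) (by omega)]
  rw [getTab seqQ m.toNat (m - (j:Int)) (by omega) (by omega)]
  rw [show (m - (j:Int)).toNat = m.toNat - j by omega]
  rw [← coefA_eq]
  rw [show m - 1 - (j:Int) = ((m.toNat - 1 - j : Nat) : Int) by omega]
  rw [sgn_pow]
  unfold termF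
  rw [show m - 1 - ((m.toNat - 1 - j : Nat) : Int) = (j:Int) by omega]
  rw [show (m.toNat - 1 - j) + 1 = m.toNat - j by omega]

theorem solve_eq_solve_alt (m n : Int) : solve m n = solve_alt m n := by
  rw [solve_eq_sum, solve_alt_eq_sum, map_reflect (termF m n) m.toNat, List.sum_reverse]

-- ===== VERDICT (by name: the statement is the Claim_ definition above) =====
theorem solve_spec : Claim_equal_solve := by
  intro m n _ _
  unfold Spec_solve
  exact solve_eq_solve_alt m n
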